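-- pv_equiv track=rewrite | github.com/sabotack/NFOpt | test3.py | find_paths
-- ===== SOURCE A (Python) =====
-- def find_paths(flow_values, flowName, source, target):
--     def recurse(node, path, flow):
--         if node == target:
--             return [(path, flow)]
--         paths = []
--         for (f_id, start, end), f in flow_values.items():
--             if start == node and f_id == flowName:
--                 new_flow = min(flow, f) if flow is not None else f
--                 sub_paths = recurse(end, path + [end], new_flow)
--                 for sub_path, sub_flow in sub_paths:
--                     if sub_flow > 0:
--                         paths.append((sub_path, sub_flow))
--         return paths
--
--     return recurse(source, [source], None)
-- ===== SOURCE B (Python) =====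
-- def find_paths(flow_values, flowName, source, target):
--     # Build an adjacency list and an edge-weight table once, then enumerate the
--     # node lists of all source->target paths, and compute each path's bottleneck
--     # in a separate pass.
--     succ = {}
--     weight = {}
--     for (f_id, start, end), f in flow_values.items():
--         if f_id == flowName:
--             succ.setdefault(start, []).append(end)
--             weight[(start, end)] = f
--
--     def paths_from(node):
--         if node == target:
--             return [[node]]
--         return [[node] + p for e in succ.get(node, []) for p in paths_from(e)]
--
--     result = []
--     for p in paths_from(source):
--         b = None
--         for u, v in zip(p, p[1:]):
--             w = weight[(u, v)]
--             b = w if b is None else min(b, w)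
--         if b is not None and b > 0:
--             result.append((p, b))
--     return result
-- ===== Notes on version B (the rewrite author's own statement) =====
-- stated objective: alternative
-- what changed: A re-scans the whole edge dict at every recursion step while threading the running minimum and filtering inside the recursion; B builds an adjacency list and an edge-weight table once, enumerates the path node-lists by themselves, and computes each path's bottleneck and the >0 filter in a separate final pass.
-- outside the precondition, e.g. on find_paths({}, 'f', 'a', 'a'): A returns [(['a'], None)], B returns []
import Mathlib
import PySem

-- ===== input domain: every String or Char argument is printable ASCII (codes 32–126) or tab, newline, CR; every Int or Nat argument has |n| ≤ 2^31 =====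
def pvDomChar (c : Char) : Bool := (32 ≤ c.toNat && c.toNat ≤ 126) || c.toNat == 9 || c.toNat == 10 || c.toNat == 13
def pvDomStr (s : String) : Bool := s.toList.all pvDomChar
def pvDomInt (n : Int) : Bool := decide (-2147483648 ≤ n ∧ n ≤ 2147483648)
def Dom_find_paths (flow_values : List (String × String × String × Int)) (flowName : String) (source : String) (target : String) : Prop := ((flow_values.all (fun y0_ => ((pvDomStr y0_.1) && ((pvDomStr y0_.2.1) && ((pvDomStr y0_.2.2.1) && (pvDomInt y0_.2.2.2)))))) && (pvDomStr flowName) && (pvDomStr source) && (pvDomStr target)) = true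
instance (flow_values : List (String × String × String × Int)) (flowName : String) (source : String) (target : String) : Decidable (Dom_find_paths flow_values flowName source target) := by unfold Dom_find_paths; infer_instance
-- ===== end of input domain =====

-- B replaces A's per-node rescans of the whole edge dict by an adjacency list + weight
-- table built once, enumerating path node-lists first and computing each bottleneck in a
-- separate pass (objective: alternative decomposition; equal return values).


-- the Python argument is the dict {(f_id, start, end): f}; both ports rebuild it from the list
def pvToKV (q : String × String × String × Int) : (String × String × String) × Int :=
  ((q.1, q.2.1, q.2.2.1), q.2.2.2)

-- ===== PORT A =====
-- literal port of A's inner `recurse`; the fuel argument only makes the recursion total: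
-- on inputs satisfying Pre_ (no flowName-cycle reachable from source avoiding target) the
-- recursion depth is at most flow_values.length + 1, so fuel never runs out there.
-- `flow.getD 0`: flow is None exactly when source = target (excluded by Pre_).
def aRecurse (items : List ((String × String × String) × Int)) (flowName target : String) :
    Nat → String → List String → Option Int → List (List String × Int)
  | 0, _, _, _ => []
  | fuel+1, node, path, flow =>
    if node == target then [(path, flow.getD 0)]
    else
      items.foldl (fun paths q =>
        if q.1.2.1 == node && q.1.1 == flowName then
          paths ++ (aRecurse items flowName target fuel q.1.2.2 (path ++ [q.1.2.2])
              (some (match flow with | some m => min m q.2 | none => q.2))).filter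
            (fun pr => 0 < pr.2)
        else paths) []

def find_paths (flow_values : List (String × String × String × Int)) (flowName : String) (source : String) (target : String) : List (List String × Int) :=
  aRecurse (PySem.Dict.ofList (flow_values.map pvToKV)).items flowName target
    (flow_values.length + 2) source [source] none

-- ===== PORT B =====
-- `paths_from` of Source B (fuel totalises exactly as in port A)
def bPaths (succ : PySem.Dict String (List String)) (target : String) :
    Nat → String → List (List String)
  | 0, _ => []
  | fuel+1, node =>
    if node == target then [[node]]
    else (succ.getD node []).flatMap (fun e => (bPaths succ target fuel e).map (fun p => node :: p))

-- body of Source B's bottleneck loop: `b = w if b is None else min(b, w)`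
def bStep (weight : PySem.Dict (String × String) Int) (b : Option Int) (uv : String × String) :
    Option Int :=
  some (match b with | none => weight.getD uv 0 | some x => min x (weight.getD uv 0))
-- `weight.getD uv 0`: every consecutive pair of a produced path is a stored edge, so the
-- default 0 is never read (Python's `weight[(u, v)]` cannot raise there).

def find_paths_alt (flow_values : List (String × String × String × Int)) (flowName : String) (source : String) (target : String) : List (List String × Int) :=
  let items := (PySem.Dict.ofList (flow_values.map pvToKV)).items
  let succ := items.foldl (fun d q =>
      if q.1.1 == flowName then d.modify q.1.2.1 [] (· ++ [q.1.2.2]) else d) PySem.Dict.empty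
  let weight := items.foldl (fun d q =>
      if q.1.1 == flowName then d.insert (q.1.2.1, q.1.2.2) q.2 else d) PySem.Dict.empty
  (bPaths succ target (flow_values.length + 2) source).filterMap (fun p =>
    match (p.zip p.tail).foldl (bStep weight) none with
    | none => none
    | some b => if 0 < b then some (p, b) else none)

-- ===== PRECONDITION & SPEC =====
-- flowName-edges whose start is not target (A never expands past target)
def pvEdges (flow_values : List (String × String × String × Int)) (flowName target : String) :
    List (String × String) :=
  (flow_values.filter (fun q => q.1 == flowName && !(q.2.1 == target))).map
    (fun q => (q.2.1, q.2.2.1))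

def pvStepR (E : List (String × String)) (R : List String) : List String :=
  E.foldl (fun R p => if R.contains p.1 && !(R.contains p.2) then R ++ [p.2] else R) R

def pvReach (E : List (String × String)) : Nat → List String → List String
  | 0, R => R
  | n+1, R => pvReach E n (pvStepR E R)

-- Pre_ excludes (a) source = target, where A returns [([source], None)] — None is not a
-- value of the declared Int type — and (b) inputs where a flowName-edge cycle avoiding
-- target is reachable from source, on which A's unbounded recursion raises RecursionError.
def Pre_find_paths (flow_values : List (String × String × String × Int)) (flowName : String) (source : String) (target : String) : Prop :=
  source ≠ target ∧
    (let E := pvEdges flow_values flowName target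
     (pvReach E (E.length + 1) [source]).all (fun v =>
       !((pvReach E (E.length + 1) ((E.filter (fun p => p.1 == v)).map (fun p => p.2))).contains v))) = true

instance (flow_values : List (String × String × String × Int)) (flowName : String) (source : String) (target : String) : Decidable (Pre_find_paths flow_values flowName source target) := by unfold Pre_find_paths; infer_instance

def pvWitness_find_paths : (List (String × String × String × Int)) × String × String × String :=
  ([("f", "a", "b", 5), ("f", "b", "c", 3)], "f", "a", "c")

def Spec_find_paths (flow_values : List (String × String × String × Int)) (flowName : String) (source : String) (target : String) (out : List (List String × Int)) : Prop := out = find_paths_alt flow_values flowName source target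
instance (flow_values : List (String × String × String × Int)) (flowName : String) (source : String) (target : String) (out : List (List String × Int)) : Decidable (Spec_find_paths flow_values flowName source target out) := by unfold Spec_find_paths; infer_instance

-- ===== CLAIM (what is proved, stated in full; the proofs are below) =====
def Claim_equal_find_paths : Prop := ∀ (flow_values : List (String × String × String × Int)) (flowName : String) (source : String) (target : String), Dom_find_paths flow_values flowName source target → Pre_find_paths flow_values flowName source target → Spec_find_paths flow_values flowName source target (find_paths flow_values flowName source target)

-- ===== LEMMAS AND PROOFS =====

-- the filterMap function of B's final loop, generalised over the path prefix and the
-- running minimum (A threads these through its recursion)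
def pvF (weight : PySem.Dict (String × String) Int) (path : List String) (m : Option Int)
    (p : List String) : Option (List String × Int) :=
  match (p.zip p.tail).foldl (bStep weight) m with
  | none => none
  | some b => if 0 < b then some (path ++ p.tail, b) else none

lemma pvF_pos (weight path m p pr) (h : pvF weight path m p = some pr) : 0 < pr.2 := by
  unfold pvF at h
  rcases hb : (p.zip p.tail).foldl (bStep weight) m with _ | b <;> rw [hb] at h
  · simp at h
  · rcases pr with ⟨a, c⟩
    by_cases h0 : 0 < b
    · simp [h0] at h
      omega
    · simp [h0] at h

lemma filter_pos_filterMap {α β : Type} (X : List α) (f : α → Option (β × Int))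
    (hf : ∀ x pr, f x = some pr → 0 < pr.2) :
    (X.filterMap f).filter (fun pr => 0 < pr.2) = X.filterMap f := by
  induction X with
  | nil => rfl
  | cons x xs ih =>
    simp only [List.filterMap_cons]
    rcases hx : f x with _ | pr
    · exact ih
    · simp only [List.filter_cons, decide_eq_true_eq, hf x pr hx, if_pos, ih]

lemma flatMap_filter {α β : Type} (l : List α) (c : α → Bool) (g : α → List β) :
    (l.filter c).flatMap g = l.flatMap (fun a => if c a then g a else []) := by
  induction l with
  | nil => rfl
  | cons x xs ih => by_cases hx : c x <;> simp [hx, ih]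

lemma bPaths_shape (succ : PySem.Dict String (List String)) (target : String) (fuel : Nat)
    (node : String) (p : List String) (hp : p ∈ bPaths succ target fuel node) :
    ∃ r, p = node :: r := by
  cases fuel with
  | zero => simp [bPaths] at hp
  | succ fuel =>
    unfold bPaths at hp
    by_cases ht : node == target
    · rw [if_pos ht] at hp
      simp at hp
      exact ⟨[], by simp [hp]⟩
    · rw [if_neg ht] at hp
      simp only [List.mem_flatMap, List.mem_map] at hp
      obtain ⟨e, _, p', _, hp'⟩ := hp
      exact ⟨p', hp'.symm⟩

-- the main correspondence: A's recursion equals B's path enumeration followed by the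
-- bottleneck/filter pass, generalised over fuel, node, accumulated path and running min
lemma pv_main (items : List ((String × String × String) × Int)) (flowName target : String)
    (succ : PySem.Dict String (List String)) (weight : PySem.Dict (String × String) Int)
    (hsucc : ∀ node, succ.getD node [] =
      (((items.filter (fun q => q.1.1 == flowName)).filter (fun q => q.1.2.1 == node)).map
        (fun q => q.1.2.2)))
    (hw : ∀ q ∈ items, q.1.1 = flowName → weight.getD (q.1.2.1, q.1.2.2) 0 = q.2) :
    ∀ (fuel : Nat) (node : String) (path : List String) (m : Option Int),
      aRecurse items flowName target fuel node path m =
        if node == target then (if fuel = 0 then [] else [(path, m.getD 0)])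
        else (bPaths succ target fuel node).filterMap (pvF weight path m) := by
  intro fuel
  induction fuel with
  | zero => intro node path m; by_cases ht : node == target <;> simp [aRecurse, bPaths, ht]
  | succ fuel ih =>
    intro node path m
    by_cases ht : node == target
    · simp [aRecurse, ht]
    · have hfold :
          (fun (paths : List (List String × Int)) (q : (String × String × String) × Int) =>
            if q.1.2.1 == node && q.1.1 == flowName then
              paths ++ (aRecurse items flowName target fuel q.1.2.2 (path ++ [q.1.2.2])
                  (some (match m with | some x => min x q.2 | none => q.2))).filter
                (fun pr => 0 < pr.2)
            else paths)
          = (fun paths q => paths ++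
              (if q.1.2.1 == node && q.1.1 == flowName then
                (aRecurse items flowName target fuel q.1.2.2 (path ++ [q.1.2.2])
                    (some (match m with | some x => min x q.2 | none => q.2))).filter
                  (fun pr => 0 < pr.2)
              else [])) := by
        funext paths q; by_cases hq : q.1.2.1 == node && q.1.1 == flowName <;> simp [hq]
      conv_lhs => rw [aRecurse]
      conv_rhs => rw [bPaths]
      simp only [ht, Bool.false_eq_true, if_false]
      rw [hfold, PySem.List.foldl_append_eq_flatMap, List.nil_append, ← flatMap_filter]
      rw [List.filterMap_flatMap, hsucc node, List.flatMap_map]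
      have hcomm : items.filter (fun q => q.1.2.1 == node && q.1.1 == flowName)
          = (items.filter (fun q => q.1.1 == flowName)).filter (fun q => q.1.2.1 == node) := by
        rw [List.filter_filter]
      rw [hcomm]
      apply List.flatMap_congr
      intro q hq
      have hq' := List.mem_filter.mp hq
      have hq'' := List.mem_filter.mp hq'.1
      have hqfn : q.1.1 = flowName := eq_of_beq hq''.2
      have hqnode : q.1.2.1 = node := eq_of_beq hq'.2
      have hqmem : q ∈ items := hq''.1
      have hwq : weight.getD (node, q.1.2.2) 0 = q.2 := by
        rw [← hqnode]; exact hw q hqmem hqfn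
      rw [ih, List.filterMap_map]
      simp only [Function.comp_def]
      clear hfold
      obtain ⟨newm, hnm⟩ : ∃ w : Int,
          (match m with | some x => min x q.2 | none => q.2) = w := ⟨_, rfl⟩
      rw [hnm]
      have hbstep : bStep weight m (node, q.1.2.2) = some newm := by
        cases m <;> simp [bStep, hwq] <;> simpa using hnm
      by_cases he : q.1.2.2 == target
      · cases fuel with
        | zero => simp [he, bPaths]
        | succ s =>
          simp only [he, if_true, Nat.succ_ne_zero, if_false]
          rw [bPaths]
          simp only [he, if_true, List.filterMap_cons, List.filterMap_nil]
          have hstep : pvF weight path m (node :: [q.1.2.2])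
              = if (0:Int) < newm then some (path ++ [q.1.2.2], newm) else none := by
            unfold pvF
            simp [List.zip_cons_cons, hbstep]
          rw [hstep]
          by_cases hpos : (0:Int) < newm <;> simp [hpos]
      · simp only [he, Bool.false_eq_true, if_false]
        rw [filter_pos_filterMap _ _ (fun p pr h => pvF_pos _ _ _ _ _ h)]
        apply List.filterMap_congr
        intro p hp
        obtain ⟨r, rfl⟩ := bPaths_shape succ target fuel q.1.2.2 p hp
        unfold pvF
        simp only [List.zip_cons_cons, List.tail_cons, List.foldl_cons, hbstep]
        rcases List.foldl (bStep weight) (some newm) ((q.1.2.2 :: r).zip r) with _ | b <;>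
          simp [List.append_assoc]

-- adjacency built by B's single pass = filtered edge list of A's scans
lemma pv_hsucc (items : List ((String × String × String) × Int)) (fn node : String) :
    (items.foldl (fun d q => if q.1.1 == fn then d.modify q.1.2.1 [] (· ++ [q.1.2.2]) else d)
        PySem.Dict.empty).getD node []
      = (((items.filter (fun q => q.1.1 == fn)).filter (fun q => q.1.2.1 == node)).map
          (fun q => q.1.2.2)) := by
  have hff := List.foldl_filter (p := fun (q : (String × String × String) × Int) => q.1.1 == fn)
    (f := fun d (q : (String × String × String) × Int) => d.modify q.1.2.1 [] (· ++ [q.1.2.2]))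
    (l := items) (init := (PySem.Dict.empty : PySem.Dict String (List String)))
  rw [← hff]
  rw [show (List.foldl (fun d (q : (String × String × String) × Int) =>
      d.modify q.1.2.1 [] (· ++ [q.1.2.2])) PySem.Dict.empty
        (items.filter (fun q => q.1.1 == fn)))
    = List.foldl (fun d (p : String × String) => d.modify p.1 [] (· ++ [p.2]))
        PySem.Dict.empty
        ((items.filter (fun q => q.1.1 == fn)).map (fun q => (q.1.2.1, q.1.2.2))) from
    (List.foldl_map
      (f := fun (q : (String × String × String) × Int) => ((q.1.2.1, q.1.2.2) : String × String))
      (g := fun (d : PySem.Dict String (List String)) (p : String × String) =>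
        d.modify p.1 [] (· ++ [p.2]))
      (l := items.filter (fun q => q.1.1 == fn)) (init := PySem.Dict.empty)).symm]
  rw [PySem.Dict.getD_foldl_modify_append]
  simp [List.filter_map, List.map_map, Function.comp_def]

-- keys of B's weight table: distinct (start, end) pairs among flowName items
lemma pv_wkeys (items : List ((String × String × String) × Int)) (fn : String)
    (hnd : (items.map (fun q => q.1)).Nodup) :
    ((items.filter (fun q => q.1.1 == fn)).map (fun q => ((q.1.2.1, q.1.2.2) : String × String))).Nodup := by
  apply List.Nodup.map_on
  · intro x hx y hy hxy
    have hx' : x.1.1 = fn := eq_of_beq (List.mem_filter.mp hx).2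
    have hy' : y.1.1 = fn := eq_of_beq (List.mem_filter.mp hy).2
    have hkey : x.1 = y.1 := by
      obtain ⟨⟨x1, x2, x3⟩, x4⟩ := x
      obtain ⟨⟨y1, y2, y3⟩, y4⟩ := y
      simp_all
    exact List.inj_on_of_nodup_map hnd ((List.mem_filter.mp hx).1)
      ((List.mem_filter.mp hy).1) hkey
  · exact (List.Nodup.of_map _ hnd).filter _

-- B's weight table returns each flowName item's own value
lemma pv_hw (items : List ((String × String × String) × Int)) (fn : String)
    (hnd : (items.map (fun q => q.1)).Nodup)
    (q : (String × String × String) × Int) (hq : q ∈ items) (hfn : q.1.1 = fn) :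
    (items.foldl (fun d q => if q.1.1 == fn then d.insert (q.1.2.1, q.1.2.2) q.2 else d)
        PySem.Dict.empty).getD (q.1.2.1, q.1.2.2) 0 = q.2 := by
  have hff := List.foldl_filter (p := fun (q : (String × String × String) × Int) => q.1.1 == fn)
    (f := fun d (q : (String × String × String) × Int) => d.insert (q.1.2.1, q.1.2.2) q.2)
    (l := items) (init := (PySem.Dict.empty : PySem.Dict (String × String) Int))
  rw [← hff]
  have hfresh : ∀ a ∈ items.filter (fun q => q.1.1 == fn),
      (PySem.Dict.empty : PySem.Dict (String × String) Int).contains (a.1.2.1, a.1.2.2) = false :=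
    fun a _ => PySem.Dict.contains_empty _
  have hitems := PySem.Dict.items_foldl_insert_fresh (items.filter (fun q => q.1.1 == fn))
    (fun a => ((a.1.2.1, a.1.2.2) : String × String)) (fun a => a.2) PySem.Dict.empty hfresh
    (pv_wkeys items fn hnd)
  have hqf : q ∈ items.filter (fun q => q.1.1 == fn) :=
    List.mem_filter.mpr ⟨hq, by simp [hfn]⟩
  apply PySem.Dict.getD_of_mem_items
  · rw [hitems]
    simp only [show (PySem.Dict.empty : PySem.Dict (String × String) Int).items = [] from rfl,
      List.nil_append, List.mem_map]
    exact ⟨q, hqf, rfl⟩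
  · exact PySem.Dict.nodup_keys_foldl_insert_key _ _ _ _ (PySem.Dict.nodup_keys_empty)

-- ===== VERDICT (by name: the statement is the Claim_ definition above) =====
theorem find_paths_spec : Claim_equal_find_paths := by
  unfold Claim_equal_find_paths
  intro fv fn src tgt _ hpre
  obtain ⟨hst, -⟩ := hpre
  unfold Spec_find_paths find_paths find_paths_alt
  have hnd : (((PySem.Dict.ofList (fv.map pvToKV)).items).map (fun q => q.1)).Nodup :=
    PySem.Dict.nodup_keys_ofList (fv.map pvToKV)
  rw [pv_main _ fn tgt _ _ (pv_hsucc _ fn) (fun q hq hfn => pv_hw _ fn hnd q hq hfn)]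
  have hsrc : (src == tgt) = false := by simp [hst]
  simp only [hsrc, Bool.false_eq_true, if_false]
  apply List.filterMap_congr
  intro p hp
  obtain ⟨r, rfl⟩ := bPaths_shape _ tgt _ src p hp
  unfold pvF
  rcases List.foldl (bStep _) none ((src :: r).zip (src :: r).tail) with _ | b <;> simp
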